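-- pv_equiv track=rewrite | github.com/carlostasi/LLM_exam | loRa.py | departments_matching
-- ===== SOURCE A (Python) =====
-- def departments_matching(prediction, valid_labels):
--     pred_lower = prediction.lower().strip()
--     for label in valid_labels:
--         if pred_lower == label.lower():
--             return label
--     for label in valid_labels:
--         if pred_lower.startswith(label.lower()):
--             return label
--     sorted_labels = sorted(valid_labels, key=len, reverse=True)
--     for label in sorted_labels:
--         if label.lower() in pred_lower:
--             return label
--     return None
-- ===== SOURCE B (Python) =====
-- def departments_matching(prediction, valid_labels):
--     pred_lower = prediction.lower().strip()
--     first_exact = None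
--     first_prefix = None
--     best_sub = None
--     for label in valid_labels:
--         ll = label.lower()
--         if first_exact is None and pred_lower == ll:
--             first_exact = label
--         if first_prefix is None and pred_lower.startswith(ll):
--             first_prefix = label
--         if ll in pred_lower and (best_sub is None or len(label) > len(best_sub)):
--             best_sub = label
--     if first_exact is not None:
--         return first_exact
--     if first_prefix is not None:
--         return first_prefix
--     return best_sub
-- ===== Notes on version B (the rewrite author's own statement) =====
-- stated objective: alternative
-- what changed: Replaced A's three sequential scans (the third over a full length-descending sort of the labels) by one pass over valid_labels that simultaneously tracks the first exact match, the first prefix match, and the longest (earliest on ties) substring match, then returns them in priority order; the sort disappears.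
import Mathlib
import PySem

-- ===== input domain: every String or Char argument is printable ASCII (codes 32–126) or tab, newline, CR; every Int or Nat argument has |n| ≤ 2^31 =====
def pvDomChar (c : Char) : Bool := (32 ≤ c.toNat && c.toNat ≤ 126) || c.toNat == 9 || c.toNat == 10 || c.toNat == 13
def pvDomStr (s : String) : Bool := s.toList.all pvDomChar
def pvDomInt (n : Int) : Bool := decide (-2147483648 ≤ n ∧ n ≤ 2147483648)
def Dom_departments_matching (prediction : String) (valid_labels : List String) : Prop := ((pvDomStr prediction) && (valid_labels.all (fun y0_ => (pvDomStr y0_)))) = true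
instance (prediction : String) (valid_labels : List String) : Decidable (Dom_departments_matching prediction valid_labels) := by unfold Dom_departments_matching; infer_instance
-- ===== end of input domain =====

-- B replaces A's three scans (the third over a length-descending sort) by one pass that tracks the
-- first exact match, the first prefix match and the longest-then-earliest substring match (alternative decomposition).

-- ===== PORT A =====
def departments_matching (prediction : String) (valid_labels : List String) : Option String :=
  let pred_lower := PySem.Str.strip (PySem.Str.lower prediction)
  match valid_labels.find? (fun label => pred_lower == PySem.Str.lower label) with
  | some label => some label
  | none =>
    match valid_labels.find? (fun label => PySem.Str.startswith pred_lower (PySem.Str.lower label)) with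
    | some label => some label
    | none =>
      let sorted_labels := PySem.List.sorted valid_labels PySem.Str.len true
      sorted_labels.find? (fun label => PySem.Str.isIn (PySem.Str.lower label) pred_lower)

-- ===== PORT B =====
def departments_matching_alt (prediction : String) (valid_labels : List String) : Option String :=
  let pred_lower := PySem.Str.strip (PySem.Str.lower prediction)
  let st := valid_labels.foldl
    (fun (s : Option String × Option String × Option String) label =>
      let ll := PySem.Str.lower label
      let fe := if s.1 = none ∧ pred_lower == ll then some label else s.1
      let fp := if s.2.1 = none ∧ PySem.Str.startswith pred_lower ll then some label else s.2.1
      let bs := if PySem.Str.isIn ll pred_lower then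
                  match s.2.2 with
                  | none => some label
                  | some b => if PySem.Str.len b < PySem.Str.len label then some label else s.2.2
                else s.2.2
      (fe, fp, bs))
    (none, none, none)
  match st.1 with
  | some label => some label
  | none =>
    match st.2.1 with
    | some label => some label
    | none => st.2.2

-- ===== PRECONDITION & SPEC =====
def Spec_departments_matching (prediction : String) (valid_labels : List String) (out : Option String) : Prop := out = departments_matching_alt prediction valid_labels
instance (prediction : String) (valid_labels : List String) (out : Option String) : Decidable (Spec_departments_matching prediction valid_labels out) := by unfold Spec_departments_matching; infer_instance

-- ===== CLAIM (what is proved, stated in full; the proofs are below) =====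
def Claim_equal_departments_matching : Prop := ∀ (prediction : String) (valid_labels : List String), Dom_departments_matching prediction valid_labels → Spec_departments_matching prediction valid_labels (departments_matching prediction valid_labels)

-- ===== LEMMAS AND PROOFS =====

-- first-match accumulator: once set, it never changes
theorem foldl_first_some {α : Type} (p : α → Bool) (a : α) (xs : List α) :
    xs.foldl (fun acc x => if acc = none ∧ p x then some x else acc) (some a) = some a := by
  induction xs with
  | nil => rfl
  | cons y ys ih => simpa using ih

-- first-match accumulator computes find?
theorem foldl_first_eq_find? {α : Type} (p : α → Bool) (xs : List α) :
    xs.foldl (fun acc x => if acc = none ∧ p x then some x else acc) none = xs.find? p := by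
  induction xs with
  | nil => rfl
  | cons y ys ih =>
    by_cases h : p y = true
    · simp [List.foldl_cons, h, foldl_first_some]
    · simp [List.foldl_cons, h, ih]

-- find? over insertBy into a key-descending list
theorem find?_insertBy {α : Type} (key : α → Int) (q : α → Bool) (x : α) (l : List α)
    (hs : l.Pairwise (fun a b => key b ≤ key a)) :
    (PySem.List.insertBy (fun a b => decide (key b < key a)) x l).find? q =
      if q x then
        match l.find? q with
        | none => some x
        | some b => if key b < key x then some x else some b
      else l.find? q := by
  induction l with
  | nil =>
    by_cases h : q x = true <;> simp [PySem.List.insertBy, List.find?, h]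
  | cons y ys ih =>
    have hy : ∀ b ∈ ys, key b ≤ key y := (List.pairwise_cons.mp hs).1
    have hs' : ys.Pairwise (fun a b => key b ≤ key a) := (List.pairwise_cons.mp hs).2
    by_cases hlt : key y < key x
    · -- x goes in front
      simp only [PySem.List.insertBy, hlt, decide_true, if_true]
      by_cases hqx : q x = true
      · rw [List.find?_cons_of_pos hqx, if_pos hqx]
        cases hfy : (y :: ys).find? q with
        | none => simp
        | some b =>
          have hb : b ∈ y :: ys := List.mem_of_find?_eq_some hfy
          have hble : key b ≤ key y := by
            rcases List.mem_cons.mp hb with h | h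
            · exact h ▸ le_refl _
            · exact hy b h
          have hbx : key b < key x := lt_of_le_of_lt hble hlt
          simp [hbx]
      · rw [List.find?_cons_of_neg hqx, if_neg hqx]
    · -- x goes after y
      simp only [PySem.List.insertBy, hlt, decide_false, Bool.false_eq_true, if_false]
      by_cases hqy : q y = true
      · rw [List.find?_cons_of_pos hqy, List.find?_cons_of_pos hqy]
        by_cases hqx : q x = true <;> simp [hqx, hlt]
      · rw [List.find?_cons_of_neg hqy, List.find?_cons_of_neg hqy]
        exact ih hs'

-- max-length-first accumulator computes find? over the stable length-descending sort
theorem foldl_best_eq_find?_sorted (key : String → Int) (q : String → Bool) (xs : List String) :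
    xs.foldl
      (fun acc x => if q x then
          match acc with
          | none => some x
          | some b => if key b < key x then some x else acc
        else acc) none
      = (PySem.List.sorted xs key true).find? q := by
  induction xs using List.reverseRecOn with
  | nil => rfl
  | append_singleton ys x ih =>
    have hsort : PySem.List.sorted (ys ++ [x]) key true =
        PySem.List.insertBy (fun a b => decide (key b < key a)) x (PySem.List.sorted ys key true) := by
      rw [PySem.List.sorted_rev_eq_foldl_insertBy, PySem.List.sorted_rev_eq_foldl_insertBy,
        List.foldl_append]
      rfl
    have hpw : (PySem.List.sorted ys key true).Pairwise (fun a b => key b ≤ key a) :=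
      PySem.List.sorted_pairwise_rev ys key
    rw [hsort, find?_insertBy key q x _ hpw, List.foldl_append, List.foldl_cons, List.foldl_nil, ih]
    by_cases hqx : q x = true
    · cases hf : (PySem.List.sorted ys key true).find? q with
      | none => simp [hqx]
      | some b => by_cases hlt : key b < key x <;> simp [hqx, hlt]
    · simp [hqx]

-- the triple fold of B splits into three independent folds
theorem foldl_triple_split (pl : String) (xs : List String)
    (a b : Option String) (c : Option String) :
    xs.foldl
      (fun (s : Option String × Option String × Option String) label =>
        let ll := PySem.Str.lower label
        let fe := if s.1 = none ∧ pl == ll then some label else s.1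
        let fp := if s.2.1 = none ∧ PySem.Str.startswith pl ll then some label else s.2.1
        let bs := if PySem.Str.isIn ll pl then
                    match s.2.2 with
                    | none => some label
                    | some b => if PySem.Str.len b < PySem.Str.len label then some label else s.2.2
                  else s.2.2
        (fe, fp, bs)) (a, b, c)
    = (xs.foldl (fun acc x => if acc = none ∧ pl == PySem.Str.lower x then some x else acc) a,
       xs.foldl (fun acc x => if acc = none ∧ PySem.Str.startswith pl (PySem.Str.lower x) then some x else acc) b,
       xs.foldl (fun acc x => if PySem.Str.isIn (PySem.Str.lower x) pl then
            match acc with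
            | none => some x
            | some b => if PySem.Str.len b < PySem.Str.len x then some x else acc
          else acc) c) := by
  induction xs generalizing a b c with
  | nil => rfl
  | cons y ys ih => simp only [List.foldl_cons]; exact ih _ _ _

-- ===== VERDICT (by name: the statement is the Claim_ definition above) =====
theorem departments_matching_spec : Claim_equal_departments_matching := by
  intro prediction valid_labels _
  unfold Spec_departments_matching departments_matching departments_matching_alt
  simp only [foldl_triple_split, foldl_first_eq_find?, foldl_best_eq_find?_sorted]
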